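-- pv_equiv track=rewrite | github.com/feyli/gauss-pivot | app.py | coordonnees_pivot
-- ===== SOURCE A (Python) =====
-- def coordonnees_pivot(S, k):
--     ligne = k
--     minimum = -1  # Initialize minimum with a value that will always be updated.
--
--     # Ensure you do not go out of bounds by limiting the range
--     for i in range(ligne, len(S)):
--         for j, val in enumerate(S[i]):
--             if val != 0:
--                 if minimum == -1 or j < minimum:
--                     minimum = j
--                     ligne = i
--                 break
--
--     return [ligne, minimum]
-- ===== SOURCE B (Python) =====
-- def coordonnees_pivot(S, k):
--     # Column-major scan: find the global leftmost nonzero column directly,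
--     # returning the first row (in range order) that has a nonzero entry there.
--     rows = list(range(k, len(S)))
--     width = max((len(S[i]) for i in rows), default=0)
--     for j in range(width):
--         for i in rows:
--             row = S[i]
--             if j < len(row) and row[j] != 0:
--                 return [i, j]
--     return [k, -1]
-- ===== Notes on version B (the rewrite author's own statement) =====
-- stated objective: alternative
-- what changed: A does a row-major fold tracking the running minimum first-nonzero column with a tie-break; B scans column-major (columns outer, rows inner) and returns immediately at the first nonzero entry, which is the global leftmost one.
import Mathlib
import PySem

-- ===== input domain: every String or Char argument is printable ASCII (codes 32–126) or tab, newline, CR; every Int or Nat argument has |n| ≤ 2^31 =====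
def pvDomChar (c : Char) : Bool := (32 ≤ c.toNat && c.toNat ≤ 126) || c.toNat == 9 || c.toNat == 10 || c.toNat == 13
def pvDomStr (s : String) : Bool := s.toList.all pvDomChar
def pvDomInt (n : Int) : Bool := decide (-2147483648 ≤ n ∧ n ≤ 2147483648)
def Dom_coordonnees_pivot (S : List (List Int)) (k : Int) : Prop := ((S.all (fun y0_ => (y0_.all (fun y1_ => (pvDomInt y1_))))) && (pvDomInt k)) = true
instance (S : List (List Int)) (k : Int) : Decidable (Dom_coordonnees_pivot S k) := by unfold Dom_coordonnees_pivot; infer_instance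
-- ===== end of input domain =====

-- B replaces A's row-major minimum-tracking fold by a column-major scan that
-- returns at the first nonzero entry; same result, same cost (objective: alternative).


-- ===== PORT A =====
-- inner 'for j, val in enumerate(S[i]): … break' of A
def pvRowScanA (st : Int × Int) (i : Int) : List (Int × Int) → Int × Int
  | [] => st
  | (j, val) :: rest =>
      if val ≠ 0 then (if st.2 = -1 ∨ j < st.2 then (i, j) else st)
      else pvRowScanA st i rest

def coordonnees_pivot (S : List (List Int)) (k : Int) : List Int :=
  let r := (PySem.List.pyRange k (S.length : Int) 1).foldl
      (fun st i => pvRowScanA st i (PySem.List.enumerate (PySem.List.pyGetD S i []) 0)) (k, -1)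
  [r.1, r.2]

-- ===== PORT B =====
-- inner 'for i in rows: if j < len(S[i]) and S[i][j] != 0: return [i, j]' of B
def pvFindInCol (S : List (List Int)) (j : Int) : List Int → Option Int
  | [] => none
  | i :: rest =>
      let row := PySem.List.pyGetD S i []
      if j < (row.length : Int) ∧ PySem.List.pyGetD row j 0 ≠ 0 then some i
      else pvFindInCol S j rest

-- outer 'for j in range(width): …' of B, with the early return as an Option
def pvColLoop (S : List (List Int)) (rows : List Int) : List Int → Option (Int × Int)
  | [] => none
  | j :: js =>
      match pvFindInCol S j rows with
      | some i => some (i, j)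
      | none => pvColLoop S rows js

def coordonnees_pivot_alt (S : List (List Int)) (k : Int) : List Int :=
  let rows := PySem.List.pyRange k (S.length : Int) 1
  let width := (rows.map (fun i => ((PySem.List.pyGetD S i []).length : Int))).foldl max 0
  match pvColLoop S rows (PySem.List.pyRange 0 width 1) with
  | some p => [p.1, p.2]
  | none => [k, -1]

-- ===== PRECONDITION & SPEC =====
-- Pre_ excludes exactly k < -len(S), where the Python A raises IndexError (S[i] with i < -len(S)).
def Pre_coordonnees_pivot (S : List (List Int)) (k : Int) : Prop := -(S.length : Int) ≤ k
instance (S : List (List Int)) (k : Int) : Decidable (Pre_coordonnees_pivot S k) := by unfold Pre_coordonnees_pivot; infer_instance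
def pvWitness_coordonnees_pivot : List (List Int) × Int := ([[0, 1], [2, 0]], 0)

def Spec_coordonnees_pivot (S : List (List Int)) (k : Int) (out : List Int) : Prop := out = coordonnees_pivot_alt S k
instance (S : List (List Int)) (k : Int) (out : List Int) : Decidable (Spec_coordonnees_pivot S k out) := by unfold Spec_coordonnees_pivot; infer_instance

-- ===== CLAIM (what is proved, stated in full; the proofs are below) =====
def Claim_equal_coordonnees_pivot : Prop := ∀ (S : List (List Int)) (k : Int), Dom_coordonnees_pivot S k → Pre_coordonnees_pivot S k → Spec_coordonnees_pivot S k (coordonnees_pivot S k)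

-- ===== LEMMAS AND PROOFS =====

-- first index ≥ n (Nat bookkeeping) of a nonzero entry of a row
def pvFAux : List Int → Nat → Option Nat
  | [], _ => none
  | x :: xs, n => if x ≠ 0 then some n else pvFAux xs (n + 1)

-- best (row, column) pair A's fold ends with, structured for induction
def pvBest (S : List (List Int)) : List Int → Option (Int × Nat)
  | [] => none
  | i :: t =>
      match pvFAux (PySem.List.pyGetD S i []) 0 with
      | none => pvBest S t
      | some j =>
          match pvBest S t with
          | none => some (i, j)
          | some p => if p.2 < j then some p else some (i, j)

theorem pvRowScanA_eq (row : List Int) : ∀ (n : Nat) (st : Int × Int) (i : Int),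
    pvRowScanA st i (PySem.List.enumerate row (n : Int)) =
      match pvFAux row n with
      | none => st
      | some j => if st.2 = -1 ∨ (j : Int) < st.2 then (i, (j : Int)) else st := by
  induction row with
  | nil => intro n st i; simp [PySem.List.enumerate_nil, pvRowScanA, pvFAux]
  | cons x xs ih =>
      intro n st i
      rw [PySem.List.enumerate_cons]
      by_cases hx : x = 0
      · have hcast : ((n : Int) + 1) = ((n + 1 : Nat) : Int) := by push_cast; ring
        have h1 : pvRowScanA st i (((n : Int), x) :: PySem.List.enumerate xs ((n : Int) + 1)) =
            pvRowScanA st i (PySem.List.enumerate xs ((n : Int) + 1)) := by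
          simp [pvRowScanA, hx]
        rw [h1, hcast, ih (n + 1) st i]
        simp [pvFAux, hx]
      · simp [pvRowScanA, pvFAux, hx]

theorem pvRowScanA_eq0 (row : List Int) (st : Int × Int) (i : Int) :
    pvRowScanA st i (PySem.List.enumerate row 0) =
      match pvFAux row 0 with
      | none => st
      | some j => if st.2 = -1 ∨ (j : Int) < st.2 then (i, (j : Int)) else st := by
  have h := pvRowScanA_eq row 0 st i
  simpa using h

theorem pvFAux_some (row : List Int) : ∀ (n j : Nat), pvFAux row n = some j →
    n ≤ j ∧ j - n < row.length ∧ row.getD (j - n) 0 ≠ 0 ∧ ∀ m < j - n, row.getD m 0 = 0 := by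
  induction row with
  | nil => intro n j h; simp [pvFAux] at h
  | cons x xs ih =>
      intro n j h
      by_cases hx : x = 0
      · simp [pvFAux, hx] at h
        obtain ⟨h1, h2, h3, h4⟩ := ih (n + 1) j h
        refine ⟨by omega, by simp; omega, ?_, ?_⟩
        · have : j - n = (j - (n + 1)) + 1 := by omega
          rw [this]; simpa using h3
        · intro m hm
          match m with
          | 0 => simp [hx]
          | m + 1 =>
              have : m < j - (n + 1) := by omega
              simpa using h4 m this
      · simp [pvFAux, hx] at h
        subst h
        exact ⟨le_refl _, by simp, by simpa using hx, by omega⟩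

theorem pvFAux_none (row : List Int) : ∀ (n : Nat), pvFAux row n = none →
    ∀ m < row.length, row.getD m 0 = 0 := by
  induction row with
  | nil => intro n _ m hm; simp at hm
  | cons x xs ih =>
      intro n h m hm
      by_cases hx : x = 0
      · simp [pvFAux, hx] at h
        match m with
        | 0 => simp [hx]
        | m + 1 => simpa using ih (n + 1) h m (by simpa using hm)
      · simp [pvFAux, hx] at h

theorem pvFAux_hit (row : List Int) (j : Nat) (hj : j < row.length) (hz : row.getD j 0 ≠ 0) :
    ∃ j', pvFAux row 0 = some j' ∧ j' ≤ j := by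
  cases h : pvFAux row 0 with
  | none => exact absurd (pvFAux_none row 0 h j hj) hz
  | some j' =>
      refine ⟨j', rfl, ?_⟩
      obtain ⟨-, -, -, h4⟩ := pvFAux_some row 0 j' h
      by_contra hlt
      exact hz (h4 j (by omega))

-- A's fold computes pvBest combined with the incoming state
theorem pvFoldA (S : List (List Int)) : ∀ (R : List Int) (st : Int × Int),
    (st.2 = -1 ∨ 0 ≤ st.2) →
    R.foldl (fun st i => pvRowScanA st i (PySem.List.enumerate (PySem.List.pyGetD S i []) 0)) st =
      match pvBest S R with
      | none => st
      | some p => if st.2 = -1 ∨ (p.2 : Int) < st.2 then (p.1, (p.2 : Int)) else st := by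
  intro R
  induction R with
  | nil => intro st _; simp [pvBest]
  | cons i t ih =>
      intro st hst
      rw [List.foldl_cons, pvRowScanA_eq0]
      cases hf : pvFAux (PySem.List.pyGetD S i []) 0 with
      | none => simp only [pvBest, hf]; exact ih st hst
      | some j =>
          simp only [pvBest, hf]
          cases hb : pvBest S t with
          | none =>
              by_cases hc : st.2 = -1 ∨ (j : Int) < st.2
              · rw [if_pos hc, ih _ (Or.inr (by positivity)), hb]
                simp [hc]
              · rw [if_neg hc, ih st hst, hb]
                simp [hc]
          | some p =>
              obtain ⟨i', j'⟩ := p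
              by_cases hc : st.2 = -1 ∨ (j : Int) < st.2
              · rw [if_pos hc, ih _ (Or.inr (by positivity)), hb]
                by_cases hpj : j' < j
                · have hpj' : (j' : Int) < (j : Int) := by exact_mod_cast hpj
                  have hr : st.2 = -1 ∨ (j' : Int) < st.2 := by
                    rcases hc with h | h
                    · exact Or.inl h
                    · exact Or.inr (by omega)
                  simp [hpj, hpj', hr]
                · have hjm : ((j : Nat) : Int) ≠ -1 := by omega
                  simp [hpj, hc, hjm]
              · rw [if_neg hc, ih st hst, hb]
                rw [not_or] at hc
                obtain ⟨hne, hle'⟩ := hc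
                have hle : st.2 ≤ (j : Int) := not_lt.mp hle'
                by_cases hpj : j' < j
                · simp [hpj]
                · have hjj : (j : Int) ≤ (j' : Int) := by exact_mod_cast Nat.not_lt.mp hpj
                  have h2 : ¬ (j' : Int) < st.2 := by omega
                  simp [hpj, hne, hle', h2]

-- pvBest facts
theorem pvBest_none (S : List (List Int)) : ∀ (R : List Int), pvBest S R = none →
    ∀ i ∈ R, pvFAux (PySem.List.pyGetD S i []) 0 = none := by
  intro R
  induction R with
  | nil => simp
  | cons a t ih =>
      intro h i hi
      cases hf : pvFAux (PySem.List.pyGetD S a []) 0 with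
      | none =>
          simp only [pvBest, hf] at h
          rcases List.mem_cons.mp hi with rfl | hmem
          · exact hf
          · exact ih h i hmem
      | some j =>
          simp only [pvBest, hf] at h
          cases hb : pvBest S t <;> simp [hb] at h
          split at h <;> simp_all

theorem pvBest_min (S : List (List Int)) : ∀ (R : List Int) (i : Int) (j : Nat),
    pvBest S R = some (i, j) →
    ∀ i' ∈ R, ∀ j', pvFAux (PySem.List.pyGetD S i' []) 0 = some j' → j ≤ j' := by
  intro R
  induction R with
  | nil => simp [pvBest]
  | cons a t ih =>
      intro i j h i' hi' j' hf'
      cases hf : pvFAux (PySem.List.pyGetD S a []) 0 with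
      | none =>
          simp only [pvBest, hf] at h
          rcases List.mem_cons.mp hi' with rfl | hmem
          · rw [hf] at hf'; cases hf'
          · exact ih i j h i' hmem j' hf'
      | some ja =>
          simp only [pvBest, hf] at h
          cases hb : pvBest S t with
          | none =>
              rw [hb] at h
              simp at h
              obtain ⟨rfl, rfl⟩ := h
              rcases List.mem_cons.mp hi' with rfl | hmem
              · rw [hf] at hf'; simp at hf'; omega
              · rw [pvBest_none S t hb i' hmem] at hf'; cases hf'
          | some p =>
              obtain ⟨pi, pj⟩ := p
              rw [hb] at h
              by_cases hpj : pj < ja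
              · simp [hpj] at h
                obtain ⟨rfl, rfl⟩ := h
                rcases List.mem_cons.mp hi' with rfl | hmem
                · rw [hf] at hf'; simp at hf'; omega
                · exact ih pi pj (by rw [hb]) i' hmem j' hf'
              · simp [hpj] at h
                obtain ⟨rfl, rfl⟩ := h
                rcases List.mem_cons.mp hi' with rfl | hmem
                · rw [hf] at hf'; simp at hf'; omega
                · have := ih pi pj (by rw [hb]) i' hmem j' hf'
                  omega

theorem pvBest_mem (S : List (List Int)) : ∀ (R : List Int) (i : Int) (j : Nat),
    pvBest S R = some (i, j) → i ∈ R ∧ pvFAux (PySem.List.pyGetD S i []) 0 = some j := by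
  intro R
  induction R with
  | nil => simp [pvBest]
  | cons a t ih =>
      intro i j h
      cases hf : pvFAux (PySem.List.pyGetD S a []) 0 with
      | none =>
          simp only [pvBest, hf] at h
          obtain ⟨h1, h2⟩ := ih i j h
          exact ⟨List.mem_cons_of_mem _ h1, h2⟩
      | some ja =>
          simp only [pvBest, hf] at h
          cases hb : pvBest S t with
          | none =>
              rw [hb] at h
              simp at h
              obtain ⟨rfl, rfl⟩ := h
              exact ⟨List.mem_cons_self, hf⟩
          | some p =>
              obtain ⟨pi, pj⟩ := p
              rw [hb] at h
              by_cases hpj : pj < ja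
              · simp [hpj] at h
                obtain ⟨rfl, rfl⟩ := h
                obtain ⟨h1, h2⟩ := ih pi pj (by rw [hb])
                exact ⟨List.mem_cons_of_mem _ h1, h2⟩
              · simp [hpj] at h
                obtain ⟨rfl, rfl⟩ := h
                exact ⟨List.mem_cons_self, hf⟩

-- no row hits column j → the inner scan returns none
theorem pvFindInCol_none (S : List (List Int)) (j : Int) : ∀ (R : List Int),
    (∀ i ∈ R, ¬ (j < ((PySem.List.pyGetD S i []).length : Int) ∧
        PySem.List.pyGetD (PySem.List.pyGetD S i []) j 0 ≠ 0)) →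
    pvFindInCol S j R = none := by
  intro R
  induction R with
  | nil => intro _; rfl
  | cons a t ih =>
      intro h
      simp only [pvFindInCol]
      rw [if_neg (h a List.mem_cons_self)]
      exact ih (fun i hi => h i (List.mem_cons_of_mem _ hi))

-- the hit condition at a Nat column, in List.getD form
theorem pvHit_iff (row : List Int) (j : Nat) :
    ((j : Int) < (row.length : Int) ∧ PySem.List.pyGetD row (j : Int) 0 ≠ 0) ↔
      (j < row.length ∧ row.getD j 0 ≠ 0) := by
  rw [PySem.List.pyGetD_natCast]
  constructor
  · rintro ⟨h1, h2⟩; exact ⟨by exact_mod_cast h1, h2⟩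
  · rintro ⟨h1, h2⟩; exact ⟨by exact_mod_cast h1, h2⟩

theorem pvBest_first (S : List (List Int)) : ∀ (R : List Int) (i : Int) (j : Nat),
    pvBest S R = some (i, j) → pvFindInCol S (j : Int) R = some i := by
  intro R
  induction R with
  | nil => simp [pvBest]
  | cons a t ih =>
      intro i j h
      have hmin := pvBest_min S (a :: t) i j h
      simp only [pvFindInCol]
      cases hf : pvFAux (PySem.List.pyGetD S a []) 0 with
      | none =>
          rw [if_neg]
          · simp only [pvBest, hf] at h
            exact ih i j h
          · rw [pvHit_iff]
            rintro ⟨h1, h2⟩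
            exact h2 (pvFAux_none _ 0 hf j h1)
      | some ja =>
          have hja : j ≤ ja := hmin a List.mem_cons_self ja hf
          obtain ⟨-, hlen, hnz, hzero⟩ := pvFAux_some _ 0 ja hf
          simp only [Nat.sub_zero] at hlen hnz hzero
          simp only [pvBest, hf] at h
          cases hb : pvBest S t with
          | none =>
              rw [hb] at h; simp at h
              obtain ⟨rfl, rfl⟩ := h
              rw [if_pos]
              rw [pvHit_iff]
              exact ⟨hlen, hnz⟩
          | some p =>
              obtain ⟨pi, pj⟩ := p
              rw [hb] at h
              by_cases hpj : pj < ja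
              · simp [hpj] at h
                obtain ⟨rfl, rfl⟩ := h
                rw [if_neg]
                · exact ih pi pj (by rw [hb])
                · rw [pvHit_iff]
                  rintro ⟨-, h2⟩
                  exact h2 (hzero pj hpj)
              · simp [hpj] at h
                obtain ⟨rfl, rfl⟩ := h
                rw [if_pos]
                rw [pvHit_iff]
                exact ⟨hlen, hnz⟩

theorem pvBest_below (S : List (List Int)) (R : List Int) (i : Int) (j : Nat)
    (h : pvBest S R = some (i, j)) :
    ∀ j'' : Nat, j'' < j → pvFindInCol S ((j'' : Nat) : Int) R = none := by
  intro j'' hj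
  apply pvFindInCol_none
  intro i' hi'
  rw [pvHit_iff]
  rintro ⟨h1, h2⟩
  obtain ⟨j', hj', hle⟩ := pvFAux_hit _ j'' h1 h2
  have := pvBest_min S R i j h i' hi' j' hj'
  omega

theorem pvColLoop_append (S : List (List Int)) (R : List Int) : ∀ (l1 l2 : List Int),
    pvColLoop S R (l1 ++ l2) =
      match pvColLoop S R l1 with
      | some r => some r
      | none => pvColLoop S R l2 := by
  intro l1
  induction l1 with
  | nil => intro l2; rfl
  | cons a t ih =>
      intro l2
      simp only [List.cons_append, pvColLoop]
      cases pvFindInCol S a R with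
      | some i => rfl
      | none => exact ih l2

theorem pvColLoop_none (S : List (List Int)) (R : List Int) : ∀ (js : List Int),
    (∀ j ∈ js, pvFindInCol S j R = none) → pvColLoop S R js = none := by
  intro js
  induction js with
  | nil => intro _; rfl
  | cons a t ih =>
      intro h
      simp only [pvColLoop, h a List.mem_cons_self]
      exact ih (fun j hj => h j (List.mem_cons_of_mem _ hj))

theorem pvColLoop_range_some (S : List (List Int)) (R : List Int) (W : Int) (j : Nat) (i : Int)
    (hW : (j : Int) < W)
    (hbelow : ∀ j'' : Nat, j'' < j → pvFindInCol S ((j'' : Nat) : Int) R = none)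
    (hhit : pvFindInCol S (j : Int) R = some i) :
    pvColLoop S R (PySem.List.pyRange 0 W 1) = some (i, (j : Int)) := by
  rw [PySem.List.pyRange_one_append 0 (j : Int) W (by positivity) (le_of_lt hW)]
  rw [pvColLoop_append]
  have h1 : pvColLoop S R (PySem.List.pyRange 0 (j : Int) 1) = none := by
    apply pvColLoop_none
    intro x hx
    rw [PySem.List.mem_pyRange_one] at hx
    obtain ⟨hx0, hxj⟩ := hx
    have hxn : x = ((x.toNat : Nat) : Int) := by omega
    rw [hxn]
    exact hbelow x.toNat (by omega)
  rw [h1]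
  rw [PySem.List.pyRange_one_cons hW]
  simp only [pvColLoop, hhit]

-- ===== VERDICT (by name: the statement is the Claim_ definition above) =====
theorem coordonnees_pivot_spec : Claim_equal_coordonnees_pivot := by
  intro S k _ _
  unfold Spec_coordonnees_pivot coordonnees_pivot coordonnees_pivot_alt
  simp only []
  rw [pvFoldA S _ (k, -1) (Or.inl rfl)]
  cases hb : pvBest S (PySem.List.pyRange k (S.length : Int) 1) with
  | none =>
      have hcl : pvColLoop S (PySem.List.pyRange k (S.length : Int) 1)
          (PySem.List.pyRange 0
            (((PySem.List.pyRange k (S.length : Int) 1).map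
              (fun i => ((PySem.List.pyGetD S i []).length : Int))).foldl max 0) 1) = none := by
        apply pvColLoop_none
        intro j hj
        apply pvFindInCol_none
        intro i hi
        rintro ⟨h1, h2⟩
        rw [PySem.List.mem_pyRange_one] at hj
        have hjn : j = ((j.toNat : Nat) : Int) := by omega
        rw [hjn] at h1 h2
        rw [PySem.List.pyGetD_natCast] at h2
        exact h2 (pvFAux_none _ 0 (pvBest_none S _ hb i hi) j.toNat (by exact_mod_cast h1))
      rw [hcl]
  | some p =>
      obtain ⟨i, j⟩ := p
      have hmem := pvBest_mem S _ i j hb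
      obtain ⟨hiR, hfi⟩ := hmem
      obtain ⟨-, hlen, -, -⟩ := pvFAux_some _ 0 j hfi
      simp only [Nat.sub_zero] at hlen
      have hW : (j : Int) <
          ((PySem.List.pyRange k (S.length : Int) 1).map
            (fun i => ((PySem.List.pyGetD S i []).length : Int))).foldl max 0 := by
        have hmax := (PySem.List.le_foldl_max
          ((PySem.List.pyRange k (S.length : Int) 1).map
            (fun i => ((PySem.List.pyGetD S i []).length : Int))) 0).2
        have : ((PySem.List.pyGetD S i []).length : Int) ∈
            (PySem.List.pyRange k (S.length : Int) 1).map
              (fun i => ((PySem.List.pyGetD S i []).length : Int)) :=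
          List.mem_map.mpr ⟨i, hiR, rfl⟩
        have := hmax _ this
        have hjl : (j : Int) < ((PySem.List.pyGetD S i []).length : Int) := by exact_mod_cast hlen
        omega
      rw [pvColLoop_range_some S _ _ j i hW (pvBest_below S _ i j hb) (pvBest_first S _ i j hb)]
      simp
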